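-- pv_equiv track=rewrite | github.com/Solanum-basilicus/ehestifter | backend/telegrambot/bot.py | parse_status_and_query
-- ===== SOURCE A (Python) =====
-- STATUS_OPTIONS = [
--     "Applied","Screening Booked","Screening Done","HM interview Booked","HM interview Done",
--     "More interviews Booked","More interviews Done","Rejected with Filled","Rejected with Unfortunately",
--     "Got Offer","Accepted Offer","Turned down Offer"
-- ]
--
-- def parse_status_and_query(full_text_after_command: str) -> tuple[str | None, str]:
--     """
--     Find the longest status option that matches the start of the text (case-insensitive).
--     Returns (canonical_status_or_None, remaining_query_string).
--     """
--     t = (full_text_after_command or "").strip()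
--     if not t:
--         return None, ""
--     # try longest-first to disambiguate
--     for status in sorted(STATUS_OPTIONS, key=len, reverse=True):
--         sl = status.lower()
--         if t.lower().startswith(sl):
--             rest = t[len(status):].strip()
--             return status, rest
--     return None, t  # no match; treat all as query (will trigger usage)
-- ===== SOURCE B (Python) =====
-- STATUS_OPTIONS = [
--     "Applied","Screening Booked","Screening Done","HM interview Booked","HM interview Done",
--     "More interviews Booked","More interviews Done","Rejected with Filled","Rejected with Unfortunately",
--     "Got Offer","Accepted Offer","Turned down Offer"
-- ]
--
-- def parse_status_and_query(full_text_after_command):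
--     # Single pass over STATUS_OPTIONS in original order, tracking the longest matching prefix.
--     t = (full_text_after_command or "").strip()
--     if not t:
--         return None, ""
--     tl = t.lower()
--     best = None
--     for status in STATUS_OPTIONS:
--         if (best is None or len(best) < len(status)) and tl.startswith(status.lower()):
--             best = status
--     if best is None:
--         return None, t
--     return best, t[len(best):].strip()
-- ===== Notes on version B (the rewrite author's own statement) =====
-- stated objective: simpler
-- what changed: Removes the sorted(..., key=len, reverse=True) pre-pass: B scans STATUS_OPTIONS once in original order keeping the longest matching status as a running best.
import Mathlib
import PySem

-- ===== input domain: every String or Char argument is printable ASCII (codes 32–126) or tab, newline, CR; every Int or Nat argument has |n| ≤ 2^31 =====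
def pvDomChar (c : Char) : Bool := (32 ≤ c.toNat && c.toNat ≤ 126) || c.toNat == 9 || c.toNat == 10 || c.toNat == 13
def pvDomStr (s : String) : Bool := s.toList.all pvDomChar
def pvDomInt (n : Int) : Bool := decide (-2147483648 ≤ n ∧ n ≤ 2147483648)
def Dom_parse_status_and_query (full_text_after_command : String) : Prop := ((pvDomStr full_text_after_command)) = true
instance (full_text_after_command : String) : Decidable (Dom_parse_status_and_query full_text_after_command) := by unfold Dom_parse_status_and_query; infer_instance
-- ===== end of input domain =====

-- B drops the length-sort pre-pass and keeps a running longest match in one scan (objective: simpler).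

-- ===== PORT A =====
def STATUS_OPTIONS : List String := [
  "Applied","Screening Booked","Screening Done","HM interview Booked","HM interview Done",
  "More interviews Booked","More interviews Done","Rejected with Filled","Rejected with Unfortunately",
  "Got Offer","Accepted Offer","Turned down Offer"]

-- A's 'for status in sorted(...)' loop: first match wins, else fall through to (None, t)
def pvLoopA (t : String) : List String → Option String × String
  | [] => (none, t)
  | status :: rest =>
      let sl := PySem.Str.lower status
      if PySem.Str.startswith (PySem.Str.lower t) sl then
        (some status, PySem.Str.strip (PySem.Str.slice t (some (PySem.Str.len status)) none))
      else pvLoopA t rest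

def parse_status_and_query (full_text_after_command : String) : Option String × String :=
  let t := PySem.Str.strip full_text_after_command
  if t = "" then (none, "")
  else pvLoopA t (PySem.List.sorted STATUS_OPTIONS (fun s => PySem.Str.len s) true)

-- ===== PORT B =====
-- one step of B's loop: replace best when status is longer and its lowercase is a prefix of tl
def pvStepB (tl : String) (best : Option String) (status : String) : Option String :=
  if ((match best with
       | none => true
       | some b => decide (PySem.Str.len b < PySem.Str.len status))
      && PySem.Str.startswith tl (PySem.Str.lower status)) then some status else best

def parse_status_and_query_alt (full_text_after_command : String) : Option String × String :=
  let t := PySem.Str.strip full_text_after_command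
  if t = "" then (none, "")
  else
    match STATUS_OPTIONS.foldl (pvStepB (PySem.Str.lower t)) none with
    | none => (none, t)
    | some best => (some best, PySem.Str.strip (PySem.Str.slice t (some (PySem.Str.len best)) none))

-- ===== PRECONDITION & SPEC =====
def Spec_parse_status_and_query (full_text_after_command : String) (out : Option String × String) : Prop := out = parse_status_and_query_alt full_text_after_command
instance (full_text_after_command : String) (out : Option String × String) : Decidable (Spec_parse_status_and_query full_text_after_command out) := by unfold Spec_parse_status_and_query; infer_instance

-- ===== CLAIM (what is proved, stated in full; the proofs are below) =====
def Claim_equal_parse_status_and_query : Prop := ∀ (full_text_after_command : String), Dom_parse_status_and_query full_text_after_command → Spec_parse_status_and_query full_text_after_command (parse_status_and_query full_text_after_command)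

-- ===== LEMMAS AND PROOFS =====

-- the common prefix test both loops use
def pvQ (tl : String) (s : String) : Bool := PySem.Str.startswith tl (PySem.Str.lower s)

-- two prefixes of the same list are comparable
lemma pv_chain (a b t : List Char) (h1 : a <+: t) (h2 : b <+: t) : a <+: b ∨ b <+: a := by
  have ha : a = t.take a.length := List.prefix_iff_eq_take.mp h1
  have hb : b = t.take b.length := List.prefix_iff_eq_take.mp h2
  rcases le_total a.length b.length with h | h
  · left
    have hpt : t.take a.length <+: t.take b.length := by
      rw [show t.take a.length = (t.take b.length).take a.length from by
        rw [List.take_take, min_eq_left h]]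
      exact List.take_prefix _ _
    rw [← ha, ← hb] at hpt
    exact hpt
  · right
    have hpt : t.take b.length <+: t.take a.length := by
      rw [show t.take b.length = (t.take a.length).take b.length from by
        rw [List.take_take, min_eq_left h]]
      exact List.take_prefix _ _
    rw [← ha, ← hb] at hpt
    exact hpt

-- no lowered status is a prefix of another's lowered form
lemma pv_nonprefix : ∀ a ∈ STATUS_OPTIONS, ∀ b ∈ STATUS_OPTIONS, a ≠ b →
    ¬ PySem.Chars.lower a.toList <+: PySem.Chars.lower b.toList := by decide

-- hence at most one status matches any given text
lemma pv_unique (tl : String) : ∀ a ∈ STATUS_OPTIONS, ∀ b ∈ STATUS_OPTIONS,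
    pvQ tl a = true → pvQ tl b = true → a = b := by
  intro a ha b hb hqa hqb
  by_contra hne
  have hpa : PySem.Chars.lower a.toList <+: tl.toList := by
    simp only [pvQ, PySem.Str.startswith_eq, PySem.Str.toList_lower] at hqa
    exact (PySem.Chars.startswith_iff _ _).mp hqa
  have hpb : PySem.Chars.lower b.toList <+: tl.toList := by
    simp only [pvQ, PySem.Str.startswith_eq, PySem.Str.toList_lower] at hqb
    exact (PySem.Chars.startswith_iff _ _).mp hqb
  rcases pv_chain _ _ _ hpa hpb with h | h
  · exact pv_nonprefix a ha b hb hne h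
  · exact pv_nonprefix b hb a ha (Ne.symm hne) h

-- once best is set, elements that either fail the test or equal best leave it unchanged
lemma pv_fold_keep (tl : String) (b : String) :
    ∀ L : List String, (∀ s ∈ L, pvQ tl s = true → s = b) →
    L.foldl (pvStepB tl) (some b) = some b := by
  intro L
  induction L with
  | nil => intro _; rfl
  | cons s rest ih =>
      intro h
      have hstep : pvStepB tl (some b) s = some b := by
        by_cases hq : pvQ tl s = true
        · have : s = b := h s (by simp) hq
          subst this
          simp [pvStepB]
        · simp [pvQ] at hq
          simp [pvStepB, hq]
      simp only [List.foldl_cons, hstep]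
      exact ih (fun x hx hqx => h x (by simp [hx]) hqx)

-- B's fold is find? when at most one element matches
lemma pv_fold_eq_find (tl : String) :
    ∀ L : List String, (∀ a ∈ L, ∀ b ∈ L, pvQ tl a = true → pvQ tl b = true → a = b) →
    L.foldl (pvStepB tl) none = L.find? (pvQ tl) := by
  intro L
  induction L with
  | nil => intro _; rfl
  | cons s rest ih =>
      intro hU
      by_cases hq : pvQ tl s = true
      · have hstep : pvStepB tl none s = some s := by simp [pvStepB, pvQ] at hq ⊢; exact hq
        simp only [List.foldl_cons, hstep]
        rw [pv_fold_keep tl s rest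
          (fun x hx hqx => hU x (by simp [hx]) s (by simp) hqx hq)]
        simp [hq]
      · have hstep : pvStepB tl none s = none := by
          simp [pvQ] at hq; simp [pvStepB, hq]
        simp only [List.foldl_cons, hstep]
        rw [ih (fun a ha b hb => hU a (by simp [ha]) b (by simp [hb]))]
        simp [pvQ] at hq
        simp [pvQ, hq]

-- find? is permutation-invariant when at most one element matches
lemma pv_find_perm (tl : String) (L L' : List String) (hp : L'.Perm L)
    (hU : ∀ a ∈ L, ∀ b ∈ L, pvQ tl a = true → pvQ tl b = true → a = b) :
    L'.find? (pvQ tl) = L.find? (pvQ tl) := by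
  cases h : L.find? (pvQ tl) with
  | none =>
      have hall := List.find?_eq_none.mp h
      exact List.find?_eq_none.mpr (fun x hx => hall x (hp.mem_iff.mp hx))
  | some y =>
      have hy : pvQ tl y = true := List.find?_some h
      have hyL : y ∈ L := List.mem_of_find?_eq_some h
      have hyL' : y ∈ L' := hp.mem_iff.mpr hyL
      cases h' : L'.find? (pvQ tl) with
      | none =>
          exact absurd hy (by simpa using List.find?_eq_none.mp h' y hyL')
      | some z =>
          have hz : pvQ tl z = true := List.find?_some h'
          have hzL : z ∈ L := hp.mem_iff.mp (List.mem_of_find?_eq_some h')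
          rw [hU z hzL y hyL hz hy]

-- A's first-match loop, characterized through find?
lemma pv_loopA_find (t : String) :
    ∀ L : List String, pvLoopA t L =
      match L.find? (pvQ (PySem.Str.lower t)) with
      | none => (none, t)
      | some st => (some st, PySem.Str.strip (PySem.Str.slice t (some (PySem.Str.len st)) none)) := by
  intro L
  induction L with
  | nil => rfl
  | cons s rest ih =>
      simp only [pvLoopA, List.find?_cons, pvQ, PySem.Str.startswith_eq, PySem.Str.toList_lower]
      by_cases hq : PySem.Chars.startswith (PySem.Chars.lower t.toList)
          (PySem.Chars.lower s.toList) = true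
      · simp [hq]
      · rw [Bool.not_eq_true] at hq
        simp [hq, ih]

-- ===== VERDICT (by name: the statement is the Claim_ definition above) =====
theorem parse_status_and_query_spec : Claim_equal_parse_status_and_query := by
  intro s _
  unfold Spec_parse_status_and_query parse_status_and_query parse_status_and_query_alt
  by_cases ht : PySem.Str.strip s = ""
  · simp [ht]
  · rw [if_neg ht, if_neg ht]
    set t := PySem.Str.strip s with hts
    have hU := pv_unique (PySem.Str.lower t)
    rw [pv_loopA_find t,
        pv_find_perm (PySem.Str.lower t) STATUS_OPTIONS _
          (PySem.List.sorted_perm STATUS_OPTIONS (fun s => PySem.Str.len s) true) hU,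
        ← pv_fold_eq_find (PySem.Str.lower t) STATUS_OPTIONS hU]
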